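-- pv_equiv track=rewrite | github.com/ygk313/algorithm | Programmers/Level2/PS/0822.py | solution
-- ===== SOURCE A (Python) =====
-- from itertools import combinations
--
-- def solution(relation):
--     answer = 0
--
--     row, col = len(relation), len(relation[0])
--     candidates = []
--
--     for i in range(1, col+1):
--         candidates.extend(combinations([x for x in range(col)], i))
--
--     unique = []
--     for candidate in candidates:
--         temp = [tuple(r[i] for i in candidate) for r in relation]
--
--         # 유일성 확인
--         if len(set(temp)) == row:
--             check = True
--             for u in unique:
--                 # 최소성 확인
--                 if set(u).issubset(set(candidate)):
--                     check = False
--                     break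
--             if check:
--                 unique.append(candidate)
--     answer = len(unique)
--     return answer
-- ===== SOURCE B (Python) =====
-- from itertools import combinations
--
-- def solution(relation):
--     row, col = len(relation), len(relation[0])
--
--     def uniq(cand):
--         return len({tuple(r[i] for i in cand) for r in relation}) == row
--
--     # phase 1: every unique column-subset
--     U = {c for k in range(1, col + 1) for c in combinations(range(col), k) if uniq(c)}
--     # phase 2: minimal = no one-element-deleted subset is unique
--     return sum(1 for c in U
--                if len(c) == 1 or all(c[:j] + c[j + 1:] not in U for j in range(len(c))))
-- ===== Notes on version B (the rewrite author's own statement) =====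
-- stated objective: alternative
-- what changed: B is two-phase: it first builds the full set U of unique column-subsets, then counts those whose one-element-deleted subsets are all outside U, instead of A's online filtering of each candidate against the growing list of already-found keys via pairwise issubset scans.
import Mathlib
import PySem

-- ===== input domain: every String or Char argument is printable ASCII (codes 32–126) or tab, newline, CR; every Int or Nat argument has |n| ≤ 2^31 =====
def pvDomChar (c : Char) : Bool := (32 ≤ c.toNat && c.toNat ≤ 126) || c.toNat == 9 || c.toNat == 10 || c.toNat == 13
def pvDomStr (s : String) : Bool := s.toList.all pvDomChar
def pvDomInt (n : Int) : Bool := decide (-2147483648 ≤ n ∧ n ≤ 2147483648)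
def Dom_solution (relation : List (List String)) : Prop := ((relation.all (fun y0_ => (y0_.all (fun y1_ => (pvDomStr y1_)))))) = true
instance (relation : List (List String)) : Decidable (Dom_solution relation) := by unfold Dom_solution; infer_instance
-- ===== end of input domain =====

-- B replaces A's online minimality filtering (growing key list + issubset scans) by a two-phase
-- count: build the set of all unique column-subsets, then count those with no unique
-- one-element-deleted subset. Alternative decomposition; same exact result.

-- itertools.combinations(xs, k) in lexicographic order (helper shared by both ports)
def combs {α : Type} (k : Nat) (xs : List α) : List (List α) :=
  match k, xs with
  | 0, _ => [[]]
  | _ + 1, [] => []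
  | k + 1, x :: rest => (combs k rest).map (fun c => x :: c) ++ combs (k + 1) rest

-- ===== PORT A =====
def solution (relation : List (List String)) : Int :=
  let row := relation.length
  let col := (relation.headD []).length
  -- for i in range(1, col+1): candidates.extend(combinations(range(col), i))
  let candidates := (List.range' 1 col).foldl
    (fun acc i => acc ++ combs i (List.range col)) []
  let unique := candidates.foldl (fun unique candidate =>
    let temp := relation.map (fun r => candidate.map (fun i => r.getD i ""))
    if (PySem.Set.ofList temp).length == row then
      -- check = True; for u in unique: if set(u).issubset(set(candidate)): check = False; break
      if unique.all (fun u =>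
          !(PySem.Set.issubset (PySem.Set.ofList u) (PySem.Set.ofList candidate))) then
        unique ++ [candidate]
      else unique
    else unique) []
  (unique.length : Int)

-- ===== PORT B =====
def solution_alt (relation : List (List String)) : Int :=
  let row := relation.length
  let col := (relation.headD []).length
  let uniq : List Nat → Bool := fun cand =>
    (PySem.Set.ofList (relation.map (fun r => cand.map (fun i => r.getD i "")))).length == row
  let U : PySem.Set (List Nat) := PySem.Set.ofList
    (((List.range' 1 col).flatMap (fun k => combs k (List.range col))).filter uniq)
  ((U.countP (fun c => c.length == 1 ||
      (List.range c.length).all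
        (fun j => !(PySem.Set.contains U (c.take j ++ c.drop (j + 1)))))) : Int)

-- ===== PRECONDITION & SPEC =====
-- Pre_ excludes exactly the inputs where Python A raises IndexError: the empty relation
-- (relation[0]) and relations where some row is shorter than the first row (r[i]).
def Pre_solution (relation : List (List String)) : Prop :=
  relation ≠ [] ∧ ∀ r ∈ relation, (relation.headD []).length ≤ r.length
instance (relation : List (List String)) : Decidable (Pre_solution relation) := by
  unfold Pre_solution; infer_instance

def pvWitness_solution : List (List String) := [["a", "x"], ["a", "y"]]

def Spec_solution (relation : List (List String)) (out : Int) : Prop := out = solution_alt relation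
instance (relation : List (List String)) (out : Int) : Decidable (Spec_solution relation out) := by
  unfold Spec_solution; infer_instance

-- ===== CLAIM (what is proved, stated in full; the proofs are below) =====
def Claim_equal_solution : Prop := ∀ (relation : List (List String)),
  Dom_solution relation → Pre_solution relation → Spec_solution relation (solution relation)

-- ===== LEMMAS AND PROOFS =====

-- "this column subset distinguishes all rows"
def UniqP (relation : List (List String)) (c : List Nat) : Prop :=
  (PySem.Set.ofList (relation.map (fun r => c.map (fun i => r.getD i "")))).length = relation.length

-- "minimal unique": unique and no nonempty proper sub-candidate is unique
def MinP (relation : List (List String)) (c : List Nat) : Prop :=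
  UniqP relation c ∧ ∀ d ∈ c.sublists, d ≠ [] → d ≠ c → ¬ UniqP relation d

def uniqb (relation : List (List String)) (cand : List Nat) : Bool :=
  (PySem.Set.ofList (relation.map (fun r => cand.map (fun i => r.getD i "")))).length == relation.length

def minB (relation : List (List String)) (c : List Nat) : Bool :=
  uniqb relation c && c.sublists.all (fun d => d.isEmpty || d == c || !uniqb relation d)

-- the candidate lists of sizes 1..K over columns 0..col-1, in A's enumeration order
def candsUpTo (col K : Nat) : List (List Nat) :=
  (List.range' 1 K).flatMap (fun k => combs k (List.range col))

-- A's per-candidate loop body, as a named function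
def stepA (relation : List (List String)) (unique : List (List Nat)) (candidate : List Nat) :
    List (List Nat) :=
  if uniqb relation candidate then
    if unique.all (fun u =>
        !(PySem.Set.issubset (PySem.Set.ofList u) (PySem.Set.ofList candidate))) then
      unique ++ [candidate]
    else unique
  else unique

theorem uniqb_iff (relation : List (List String)) (c : List Nat) :
    uniqb relation c = true ↔ UniqP relation c := by
  simp [uniqb, UniqP]

theorem minB_iff (relation : List (List String)) (c : List Nat) :
    minB relation c = true ↔ MinP relation c := by
  simp only [minB, MinP, Bool.and_eq_true, List.all_eq_true, Bool.or_eq_true, beq_iff_eq,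
    List.isEmpty_iff, Bool.not_eq_true', Bool.eq_false_iff, ne_eq, uniqb_iff]
  exact and_congr Iff.rfl (forall₂_congr (fun d hd => by tauto))

theorem mem_combs {α : Type} (k : Nat) (xs : List α) (c : List α) :
    c ∈ combs k xs ↔ c.Sublist xs ∧ c.length = k := by
  fun_induction combs k xs generalizing c with
  | case1 xs =>
    simp only [List.mem_singleton, List.length_eq_zero_iff]
    constructor
    · rintro rfl; exact ⟨List.nil_sublist _, rfl⟩
    · rintro ⟨_, rfl⟩; rfl
  | case2 k =>
    simp only [List.not_mem_nil, false_iff, not_and]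
    intro h hl
    have := h.length_le; simp only [List.length_nil] at this; omega
  | case3 k x rest ih1 ih2 =>
    simp only [List.mem_append, List.mem_map, ih1, ih2]
    constructor
    · rintro (⟨c', ⟨hs, hl⟩, rfl⟩ | ⟨hs, hl⟩)
      · exact ⟨List.Sublist.cons₂ _ hs, by simp [hl]⟩
      · exact ⟨hs.cons _, hl⟩
    · rintro ⟨hs, hl⟩
      rcases List.sublist_cons_iff.mp hs with h | ⟨r, rfl, hr⟩
      · exact Or.inr ⟨h, hl⟩
      · exact Or.inl ⟨r, ⟨hr, by simpa using hl⟩, rfl⟩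

theorem nodup_combs {α : Type} [DecidableEq α] (k : Nat) (xs : List α) (h : xs.Nodup) :
    (combs k xs).Nodup := by
  fun_induction combs k xs with
  | case1 xs => exact List.nodup_singleton _
  | case2 k => exact List.nodup_nil
  | case3 k x rest ih1 ih2 =>
    rcases List.nodup_cons.mp h with ⟨hx, hrest⟩
    refine List.Nodup.append ((ih1 hrest).map ?_) (ih2 hrest) ?_
    · intro a b hab; simpa using hab
    · intro c hc1 hc2
      rcases List.mem_map.mp hc1 with ⟨c', _, rfl⟩
      have := ((mem_combs _ _ _).mp hc2).1
      exact hx (this.subset (by simp))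

-- PySem.Set.ofList keeps a sublist of its input
theorem ofList_sublist {α : Type} [BEq α] [LawfulBEq α] (l : List α) :
    (PySem.Set.ofList l).Sublist l := by
  induction l using List.reverseRecOn with
  | nil => simp [PySem.Set.ofList_nil]
  | append_singleton xs x ih =>
    rw [PySem.Set.ofList_append_singleton, PySem.Set.add_eq_ite]
    split_ifs with h
    · exact ih.trans (List.sublist_append_left _ _)
    · exact ih.append (List.Sublist.refl _)

theorem nodup_len_iff {α : Type} [BEq α] [LawfulBEq α] (l : List α) :
    (PySem.Set.ofList l).length = l.length ↔ l.Nodup := by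
  constructor
  · intro h
    have := (ofList_sublist l).eq_of_length h
    rw [← this]; exact PySem.Set.nodup_ofList l
  · intro h; rw [PySem.Set.ofList_eq_self_of_nodup l h]

theorem uniqP_iff_nodup (relation : List (List String)) (c : List Nat) :
    UniqP relation c ↔ (relation.map (fun r => c.map (fun i => r.getD i ""))).Nodup := by
  unfold UniqP
  rw [← List.length_map (as := relation) (f := fun r => c.map (fun i => r.getD i "")),
    nodup_len_iff]

-- monotonicity: a superset of a unique column set is unique
theorem uniqP_mono (relation : List (List String)) {c d : List Nat}
    (hsub : ∀ x ∈ c, x ∈ d) (h : UniqP relation c) : UniqP relation d := by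
  rw [uniqP_iff_nodup] at h ⊢
  rw [List.Nodup, List.pairwise_map] at h ⊢
  refine h.imp ?_
  intro a b hne heq
  apply hne
  have := List.map_inj_left.mp heq
  exact List.map_inj_left.mpr (fun i hi => this i (hsub i hi))

-- sorted lists: subset implies sublist
theorem sublist_of_subset_of_sorted {c d : List Nat}
    (hc : c.Pairwise (· < ·)) (hd : d.Pairwise (· < ·))
    (hsub : ∀ x ∈ c, x ∈ d) : c.Sublist d := by
  induction d generalizing c with
  | nil =>
    cases c with
    | nil => exact List.Sublist.refl _
    | cons a c' => exact absurd (hsub a (by simp)) (by simp)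
  | cons y d' ih =>
    cases c with
    | nil => exact List.nil_sublist _
    | cons x c' =>
      rcases List.pairwise_cons.mp hc with ⟨hxc, hc'⟩
      rcases List.pairwise_cons.mp hd with ⟨hyd, hd'⟩
      rcases (List.mem_cons).mp (hsub x (by simp)) with rfl | hxd'
      · refine List.Sublist.cons₂ _ (ih hc' hd' ?_)
        intro z hz
        rcases (List.mem_cons).mp (hsub z (by simp [hz])) with rfl | h
        · exact absurd (hxc z hz) (lt_irrefl _)
        · exact h
      · have hyx : y < x := hyd x hxd'
        refine List.Sublist.cons _ (ih hc hd' ?_)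
        intro z hz
        rcases (List.mem_cons).mp (hsub z hz) with rfl | h
        · rcases (List.mem_cons).mp hz with rfl | hzc'
          · exact absurd hyx (lt_irrefl _)
          · exact absurd (lt_trans hyx (hxc z hzc')) (lt_irrefl _)
        · exact h

-- a proper sublist embeds into some one-element deletion
theorem sublist_eraseIdx_of_ssublist {α : Type} {d c : List α}
    (h : d.Sublist c) (hne : d ≠ c) : ∃ j < c.length, d.Sublist (c.eraseIdx j) := by
  induction h with
  | slnil => exact absurd rfl hne
  | cons a h ih => exact ⟨0, by simp, by simpa using h⟩
  | cons₂ a h ih =>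
    rename_i l₁ l₂
    by_cases he : l₁ = l₂
    · subst he; exact absurd rfl hne
    · rcases ih he with ⟨j, hj, hs⟩
      exact ⟨j + 1, by simpa using hj, by simpa using hs.cons₂ a⟩

-- every nonempty unique candidate has a nonempty minimal unique sub-candidate
theorem exists_min (relation : List (List String)) :
    ∀ (n : Nat) (c : List Nat), c.length ≤ n → c ≠ [] → UniqP relation c →
      ∃ m, m.Sublist c ∧ m ≠ [] ∧ MinP relation m := by
  intro n
  induction n with
  | zero => intro c hn hne _; cases c <;> simp_all
  | succ n ih =>
    intro c hn hne hu
    by_cases hmin : MinP relation c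
    · exact ⟨c, List.Sublist.refl _, hne, hmin⟩
    · unfold MinP at hmin
      push_neg at hmin
      rcases hmin hu with ⟨d, hd, hdne, hdnec, hdu⟩
      have hdc := List.mem_sublists.mp hd
      have hlt : d.length < c.length := by
        rcases Nat.lt_or_ge d.length c.length with h | h
        · exact h
        · exact absurd (hdc.eq_of_length (le_antisymm hdc.length_le h)) hdnec
      rcases ih d (by omega) hdne hdu with ⟨m, hm, hmne, hmmin⟩
      exact ⟨m, hm.trans hdc, hmne, hmmin⟩

theorem mem_candsUpTo (col K : Nat) (c : List Nat) :
    c ∈ candsUpTo col K ↔ c.Sublist (List.range col) ∧ 1 ≤ c.length ∧ c.length ≤ K := by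
  simp only [candsUpTo, List.mem_flatMap, mem_combs, List.mem_range'_1]
  constructor
  · rintro ⟨k, ⟨h1, h2⟩, hs, rfl⟩; exact ⟨hs, by omega⟩
  · rintro ⟨hs, h1, h2⟩; exact ⟨c.length, ⟨h1, by omega⟩, hs, rfl⟩

theorem nodup_candsUpTo (col K : Nat) : (candsUpTo col K).Nodup := by
  induction K with
  | zero => exact List.nodup_nil
  | succ K ih =>
    unfold candsUpTo at ih ⊢
    rw [List.range'_1_concat, List.flatMap_append]
    refine List.Nodup.append ih ?_ ?_
    · simpa using nodup_combs (1 + K) (List.range col) (List.nodup_range)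
    · intro c hc1 hc2
      simp only [List.flatMap_cons, List.flatMap_nil, List.append_nil] at hc2
      have h2 := ((mem_combs _ _ _).mp hc2).2
      have h1 := ((mem_candsUpTo col K c).mp hc1).2.2
      omega

theorem sorted_of_sub_range {col : Nat} {c : List Nat} (h : c.Sublist (List.range col)) :
    c.Pairwise (· < ·) := List.Pairwise.sublist h List.pairwise_lt_range

theorem one_le_length {α : Type} {d : List α} (h : d ≠ []) : 1 ≤ d.length := by
  cases d with
  | nil => exact absurd rfl h
  | cons a t => simp

theorem lt_length_of_ssublist {α : Type} {d c : List α} (h : d.Sublist c) (hne : d ≠ c) :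
    d.length < c.length := by
  rcases Nat.lt_or_ge d.length c.length with h' | h'
  · exact h'
  · exact absurd (h.eq_of_length (le_antisymm h.length_le h')) hne

-- one loop step of A turns "minimal keys among prev" into "minimal keys among prev ++ [c]"
theorem stepA_filter (relation : List (List String)) (col : Nat)
    (prev : List (List Nat)) (c : List Nat)
    (hc : c.Sublist (List.range col)) (hcne : c ≠ []) (hcnotin : c ∉ prev)
    (hprev : ∀ d ∈ prev, d.Sublist (List.range col) ∧ d ≠ [])
    (hshort : ∀ d, d.Sublist (List.range col) → d ≠ [] → d.length < c.length → d ∈ prev) :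
    stepA relation (prev.filter (minB relation)) c = (prev ++ [c]).filter (minB relation) := by
  rw [List.filter_append]
  unfold stepA
  by_cases hu : UniqP relation c
  · rw [if_pos ((uniqb_iff relation c).mpr hu)]
    by_cases hmin : MinP relation c
    · rw [List.filter_cons, List.filter_nil, if_pos ((minB_iff relation c).mpr hmin), if_pos]
      rw [List.all_eq_true]
      intro u hu'
      rcases List.mem_filter.mp hu' with ⟨hup, humin⟩
      have humin' : MinP relation u := (minB_iff relation u).mp humin
      simp only [Bool.not_eq_eq_eq_not, Bool.not_true, Bool.not_eq_true']
      rw [Bool.eq_false_iff]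
      intro hsubs
      have hsub : ∀ x ∈ u, x ∈ c := by
        have := (PySem.Set.issubset_iff _ _).mp hsubs
        intro x hx
        exact (PySem.Set.mem_ofList c x).mp (this x ((PySem.Set.mem_ofList u x).mpr hx))
      rcases hprev u hup with ⟨hus, hune⟩
      have huc : u.Sublist c :=
        sublist_of_subset_of_sorted (sorted_of_sub_range hus) (sorted_of_sub_range hc) hsub
      have hunec : u ≠ c := fun h => hcnotin (h ▸ hup)
      exact absurd humin'.1 (hmin.2 u (List.mem_sublists.mpr huc) hune hunec)
    · rw [List.filter_cons, List.filter_nil,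
        if_neg (show ¬ minB relation c = true from fun h => hmin ((minB_iff relation c).mp h)),
        List.append_nil, if_neg]
      -- the check fails: some already-found minimal key is a subset of c
      unfold MinP at hmin
      push_neg at hmin
      rcases hmin hu with ⟨d, hd, hdne, hdnec, hdu⟩
      have hdc := List.mem_sublists.mp hd
      have hdlt : d.length < c.length := lt_length_of_ssublist hdc hdnec
      rcases exists_min relation d.length d (le_refl _) hdne hdu with ⟨m, hm, hmne, hmmin⟩
      have hmc : m.Sublist c := hm.trans hdc
      have hmprev : m ∈ prev :=
        hshort m (hmc.trans hc) hmne (lt_of_le_of_lt hm.length_le hdlt)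
      rw [List.all_eq_true]
      push_neg
      refine ⟨m, List.mem_filter.mpr ⟨hmprev, (minB_iff relation m).mpr hmmin⟩, ?_⟩
      have hsubs : PySem.Set.issubset (PySem.Set.ofList m) (PySem.Set.ofList c) = true := by
        rw [PySem.Set.issubset_iff]
        intro x hx
        exact (PySem.Set.mem_ofList c x).mpr (hmc.subset ((PySem.Set.mem_ofList m x).mp hx))
      simp [hsubs]
  · rw [if_neg (fun h => hu ((uniqb_iff relation c).mp h)), List.filter_cons, List.filter_nil,
      if_neg (show ¬ minB relation c = true from fun h => hu ((minB_iff relation c).mp h).1),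
      List.append_nil]

theorem foldA_block (relation : List (List String)) (col m : Nat) :
    ∀ (L prev : List (List Nat)),
      (∀ c ∈ L, c.Sublist (List.range col) ∧ c.length = m) → 1 ≤ m → L.Nodup →
      (∀ d ∈ prev, d.Sublist (List.range col) ∧ d ≠ []) →
      (∀ c ∈ L, c ∉ prev) →
      (∀ d, d.Sublist (List.range col) → d ≠ [] → d.length < m → d ∈ prev) →
      L.foldl (stepA relation) (prev.filter (minB relation)) =
        (prev ++ L).filter (minB relation) := by
  intro L
  induction L with
  | nil => intro prev _ _ _ _ _ _; simp
  | cons c L' ih =>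
    intro prev hL hm hLn hprev hdisj hshort
    rcases hL c (by simp) with ⟨hcs, hcl⟩
    have hcne : c ≠ [] := by
      intro h; rw [h] at hcl; simp at hcl; omega
    rw [List.foldl_cons,
      stepA_filter relation col prev c hcs hcne (hdisj c (by simp)) hprev
        (fun d hds hdne hdlt => hshort d hds hdne (hcl ▸ hdlt))]
    have := ih (prev ++ [c])
      (fun x hx => hL x (by simp [hx]))
      hm (List.nodup_cons.mp hLn).2
      (fun d hd => by
        rcases List.mem_append.mp hd with h | h
        · exact hprev d h
        · simp only [List.mem_singleton] at h; exact ⟨h ▸ hcs, h ▸ hcne⟩)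
      (fun x hx => by
        intro hmem
        rcases List.mem_append.mp hmem with h | h
        · exact hdisj x (by simp [hx]) h
        · simp only [List.mem_singleton] at h
          exact (List.nodup_cons.mp hLn).1 (h ▸ hx))
      (fun d hds hdne hdlt => List.mem_append.mpr (Or.inl (hshort d hds hdne hdlt)))
    rw [this, List.append_assoc]
    rfl

theorem foldA (relation : List (List String)) (col : Nat) (K : Nat) :
    (candsUpTo col K).foldl (stepA relation) [] =
      (candsUpTo col K).filter (minB relation) := by
  induction K with
  | zero => rfl
  | succ K ih =>
    have hsplit : candsUpTo col (K + 1) = candsUpTo col K ++ combs (1 + K) (List.range col) := by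
      unfold candsUpTo
      rw [List.range'_1_concat, List.flatMap_append]
      simp
    rw [hsplit, List.foldl_append, ih]
    exact foldA_block relation col (1 + K) (combs (1 + K) (List.range col)) (candsUpTo col K)
      (fun c hc => ⟨((mem_combs _ _ _).mp hc).1, ((mem_combs _ _ _).mp hc).2⟩)
      (by omega)
      (nodup_combs (1 + K) (List.range col) List.nodup_range)
      (fun d hd => by
        rcases (mem_candsUpTo col K d).mp hd with ⟨hs, h1, h2⟩
        exact ⟨hs, by intro h; rw [h] at h1; simp at h1⟩)
      (fun c hc => by
        intro hmem
        have h1 := ((mem_combs _ _ _).mp hc).2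
        have h2 := ((mem_candsUpTo col K c).mp hmem).2.2
        omega)
      (fun d hds hdne hdlt => (mem_candsUpTo col K d).mpr
        ⟨hds, one_le_length hdne, by omega⟩)

-- the deletion predicate used by B agrees with minimality on unique candidates
theorem pred_iff_min (relation : List (List String)) (col : Nat) (c : List Nat)
    (hc : c.Sublist (List.range col)) (hcne : c ≠ []) (hcu : UniqP relation c) :
    ((c.length = 1 ∨ ∀ j < c.length,
        ¬ (c.eraseIdx j ∈ candsUpTo col col ∧ UniqP relation (c.eraseIdx j)))
      ↔ MinP relation c) := by
  have hlen1 : 1 ≤ c.length := one_le_length hcne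
  constructor
  · rintro (h1 | hdel)
    · refine ⟨hcu, ?_⟩
      intro d hd hdne hdnec hdu
      have hdc := List.mem_sublists.mp hd
      have h2 := lt_length_of_ssublist hdc hdnec
      have h3 := one_le_length hdne
      omega
    · refine ⟨hcu, ?_⟩
      intro d hd hdne hdnec hdu
      have hdc := List.mem_sublists.mp hd
      rcases sublist_eraseIdx_of_ssublist hdc hdnec with ⟨j, hj, hde⟩
      have hdlt : d.length < c.length := lt_length_of_ssublist hdc hdnec
      have hd1 : 1 ≤ d.length := one_le_length hdne
      have helen : (c.eraseIdx j).length = c.length - 1 := by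
        rw [List.length_eraseIdx]; simp [hj]
      have heu : UniqP relation (c.eraseIdx j) := uniqP_mono relation hde.subset hdu
      have hes : (c.eraseIdx j).Sublist (List.range col) := (c.eraseIdx_sublist j).trans hc
      refine hdel j hj ⟨(mem_candsUpTo col col _).mpr ⟨hes, by omega, ?_⟩, heu⟩
      · have := hes.length_le; simpa using this
  · intro hmin
    by_cases h1 : c.length = 1
    · exact Or.inl h1
    · refine Or.inr ?_
      rintro j hj ⟨hmem, heu⟩
      have helen : (c.eraseIdx j).length = c.length - 1 := by
        rw [List.length_eraseIdx]; simp [hj]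
      refine hmin.2 (c.eraseIdx j) (List.mem_sublists.mpr (c.eraseIdx_sublist j)) ?_ ?_ heu
      · intro h; rw [h] at helen; simp at helen; omega
      · intro h; rw [h] at helen; omega

def predB (U : List (List Nat)) (c : List Nat) : Bool :=
  c.length == 1 || (List.range c.length).all
    (fun j => !(PySem.Set.contains U (c.take j ++ c.drop (j + 1))))

theorem predB_iff {relation : List (List String)} (col : Nat) (c : List Nat) :
    predB ((candsUpTo col col).filter (uniqb relation)) c = true ↔
      (c.length = 1 ∨ ∀ j < c.length,
        ¬ (c.eraseIdx j ∈ candsUpTo col col ∧ UniqP relation (c.eraseIdx j))) := by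
  simp [predB, List.all_eq_true, List.mem_range, ← List.eraseIdx_eq_take_drop_succ,
    List.mem_filter, uniqb_iff, not_and]

theorem countP_eq (relation : List (List String)) (col : Nat) :
    ((candsUpTo col col).filter (uniqb relation)).countP
      (predB ((candsUpTo col col).filter (uniqb relation))) =
    ((candsUpTo col col).filter (minB relation)).length := by
  rw [List.countP_eq_length_filter, List.filter_filter]
  refine congrArg List.length (List.filter_congr ?_)
  intro c hc
  rcases (mem_candsUpTo col col c).mp hc with ⟨hs, h1, _⟩
  have hcne : c ≠ [] := by intro h; rw [h] at h1; simp at h1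
  by_cases hu : UniqP relation c
  · have hb := (uniqb_iff relation c).mpr hu
    by_cases hm : MinP relation c
    · have hp : predB ((candsUpTo col col).filter (uniqb relation)) c = true :=
        (predB_iff col c).mpr ((pred_iff_min relation col c hs hcne hu).mpr hm)
      simp [hp, hb, (minB_iff relation c).mpr hm]
    · have hp : predB ((candsUpTo col col).filter (uniqb relation)) c = false := by
        rw [Bool.eq_false_iff]
        intro h
        exact hm ((pred_iff_min relation col c hs hcne hu).mp ((predB_iff col c).mp h))
      have hmB : minB relation c = false := by
        rw [Bool.eq_false_iff]; exact fun h => hm ((minB_iff relation c).mp h)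
      simp [hp, hb, hmB]
  · have hb : uniqb relation c = false := by
      rw [Bool.eq_false_iff]; intro h; exact hu ((uniqb_iff _ _).mp h)
    have hmB : minB relation c = false := by
      rw [Bool.eq_false_iff]; exact fun h => hu ((minB_iff relation c).mp h).1
    simp [hb, hmB]

theorem solution_eq (relation : List (List String)) :
    solution relation =
      (((candsUpTo (relation.headD []).length (relation.headD []).length).filter
        (minB relation)).length : Int) := by
  show ((((List.range' 1 (relation.headD []).length).foldl
      (fun acc i => acc ++ combs i (List.range (relation.headD []).length)) []).foldl
      (stepA relation) []).length : Int) = _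
  rw [PySem.List.foldl_append_eq_flatMap, List.nil_append]
  rw [show (List.range' 1 (relation.headD []).length).flatMap
      (fun k => combs k (List.range (relation.headD []).length)) =
      candsUpTo (relation.headD []).length (relation.headD []).length from rfl]
  rw [foldA]

theorem solution_alt_eq (relation : List (List String)) :
    solution_alt relation =
      ((((candsUpTo (relation.headD []).length (relation.headD []).length).filter
          (uniqb relation)).countP
        (predB
          (((candsUpTo (relation.headD []).length (relation.headD []).length).filter
            (uniqb relation))))) : Int) := by
  have hnodup : (((candsUpTo (relation.headD []).length (relation.headD []).length).filter
      (uniqb relation))).Nodup :=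
    (nodup_candsUpTo _ _).filter _
  show ((PySem.Set.ofList (((List.range' 1 (relation.headD []).length).flatMap
      (fun k => combs k (List.range (relation.headD []).length))).filter
        (uniqb relation))).countP
      (predB (PySem.Set.ofList (((List.range' 1 (relation.headD []).length).flatMap
        (fun k => combs k (List.range (relation.headD []).length))).filter
          (uniqb relation)))) : Int) = _
  rw [show ((List.range' 1 (relation.headD []).length).flatMap
      (fun k => combs k (List.range (relation.headD []).length))) =
      candsUpTo (relation.headD []).length (relation.headD []).length from rfl]
  rw [PySem.Set.ofList_eq_self_of_nodup _ hnodup]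

-- ===== VERDICT (by name: the statement is the Claim_ definition above) =====
theorem solution_spec : Claim_equal_solution := by
  intro relation _ _
  unfold Spec_solution
  rw [solution_eq, solution_alt_eq, ← countP_eq]
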